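-- pv_equiv track=rewrite | github.com/sh4ln/Yoink | yoink/cli.py | _split_on_paste
-- ===== SOURCE A (Python) =====
-- def _split_on_paste(
--     tokens: tuple[str, ...],
-- ) -> tuple[list[str], list[str]]:
--     """Split raw token list on the literal word 'paste'.
--
--     Returns (sources, destinations). Flags (starting with '-') that appear
--     before any source are dropped here — Click already parsed them.
--     """
--     token_list = list(tokens)
--     try:
--         idx = token_list.index("paste")
--         sources = [t for t in token_list[:idx] if not t.startswith("-")]
--         destinations = [t for t in token_list[idx + 1:] if not t.startswith("-")]
--     except ValueError:
--         sources = [t for t in token_list if not t.startswith("-")]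
--         destinations = []
--     return sources, destinations
-- ===== SOURCE B (Python) =====
-- def _split_on_paste(
--     tokens: tuple[str, ...],
-- ) -> tuple[list[str], list[str]]:
--     """Single linear scan: consume the first 'paste', route non-flag tokens."""
--     sources: list[str] = []
--     destinations: list[str] = []
--     found = False
--     for t in tokens:
--         if not found and t == "paste":
--             found = True
--         elif t.startswith("-"):
--             continue
--         elif found:
--             destinations.append(t)
--         else:
--             sources.append(t)
--     return sources, destinations
-- ===== Notes on version B (the rewrite author's own statement) =====
-- stated objective: simpler
-- what changed: Replaced index('paste') + two slices + two filtering comprehensions + try/except ValueError by one stateful linear pass with a 'found' flag and two accumulator lists.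
import Mathlib
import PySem

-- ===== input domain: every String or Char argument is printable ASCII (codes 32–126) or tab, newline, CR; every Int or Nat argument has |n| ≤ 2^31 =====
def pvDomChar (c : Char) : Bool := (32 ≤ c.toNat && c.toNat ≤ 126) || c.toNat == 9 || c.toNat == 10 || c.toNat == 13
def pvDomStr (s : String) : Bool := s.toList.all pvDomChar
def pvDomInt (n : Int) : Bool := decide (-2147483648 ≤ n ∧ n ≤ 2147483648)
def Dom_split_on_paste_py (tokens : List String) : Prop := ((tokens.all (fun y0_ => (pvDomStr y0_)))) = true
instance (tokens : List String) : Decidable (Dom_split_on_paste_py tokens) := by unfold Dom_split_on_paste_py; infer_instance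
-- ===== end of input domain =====

-- B replaces index('paste') + slices + two filtering comprehensions + try/except by one linear pass with a 'found' flag (simpler).


-- ===== PORT A =====
def split_on_paste_py (tokens : List String) : List String × List String :=
  match PySem.List.index? tokens "paste" with
  | some idx =>
      ((PySem.List.slice tokens none (some (idx : Int))).filter
          (fun t => !(PySem.Str.startswith t "-")),
       (PySem.List.slice tokens (some ((idx : Int) + 1)) none).filter
          (fun t => !(PySem.Str.startswith t "-")))
  | none =>
      (tokens.filter (fun t => !(PySem.Str.startswith t "-")), [])

-- ===== PORT B =====
-- loop body of B's single pass: state = (sources, destinations, found)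
def pvStepB (st : List String × List String × Bool) (t : String) :
    List String × List String × Bool :=
  if !st.2.2 && (t == "paste") then (st.1, st.2.1, true)
  else if PySem.Str.startswith t "-" then st
  else if st.2.2 then (st.1, st.2.1 ++ [t], st.2.2)
  else (st.1 ++ [t], st.2.1, st.2.2)

def split_on_paste_py_alt (tokens : List String) : List String × List String :=
  let st := tokens.foldl pvStepB ([], [], false)
  (st.1, st.2.1)

-- ===== PRECONDITION & SPEC =====
def Spec_split_on_paste_py (tokens : List String) (out : List String × List String) : Prop := out = split_on_paste_py_alt tokens
instance (tokens : List String) (out : List String × List String) : Decidable (Spec_split_on_paste_py tokens out) := by unfold Spec_split_on_paste_py; infer_instance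

-- ===== CLAIM (what is proved, stated in full; the proofs are below) =====
def Claim_equal_split_on_paste_py : Prop := ∀ (tokens : List String), Dom_split_on_paste_py tokens → Spec_split_on_paste_py tokens (split_on_paste_py tokens)

-- ===== LEMMAS AND PROOFS =====

-- once 'found' is set, the loop only appends non-flag tokens to destinations
theorem pvLoopTrue (ts : List String) (s d : List String) :
    ts.foldl pvStepB (s, d, true) =
      (s, d ++ ts.filter (fun t => !(PySem.Str.startswith t "-")), true) := by
  induction ts generalizing d with
  | nil => simp
  | cons t ts ih =>
    simp only [List.foldl_cons, pvStepB, PySem.Str.startswith_eq]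
    by_cases h : PySem.Chars.startswith t.toList ['-'] = true <;>
      simp [h, ih, List.filter_cons]

-- before 'found', the loop computes exactly A's split on the first 'paste'
theorem pvLoopFalse (ts : List String) (s d : List String) :
    ts.foldl pvStepB (s, d, false) =
      match PySem.List.index? ts "paste" with
      | some idx =>
          (s ++ (ts.take idx).filter (fun t => !(PySem.Str.startswith t "-")),
           d ++ (ts.drop (idx + 1)).filter (fun t => !(PySem.Str.startswith t "-")),
           true)
      | none =>
          (s ++ ts.filter (fun t => !(PySem.Str.startswith t "-")), d, false) := by
  induction ts generalizing s with
  | nil => simp [PySem.List.index?]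
  | cons t ts ih =>
    by_cases hp : t = "paste"
    · subst hp
      rw [PySem.List.index?_cons_self]
      simp [pvStepB, pvLoopTrue]
    · rw [PySem.List.index?_cons_of_ne ts hp]
      cases hc : PySem.List.index? ts "paste" <;>
      · rw [PySem.List.index?_eq_idxOf?] at hc
        simp only [List.foldl_cons, pvStepB, PySem.Str.startswith_eq]
        have hb : (!false && (t == "paste")) = false := by simp [hp]
        rw [hb]
        by_cases h : PySem.Chars.startswith t.toList ['-'] = true <;>
          simp [h, ih, hc, List.filter_cons]

-- ===== VERDICT (by name: the statement is the Claim_ definition above) =====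
theorem split_on_paste_py_spec : Claim_equal_split_on_paste_py := by
  intro tokens _
  unfold Spec_split_on_paste_py split_on_paste_py split_on_paste_py_alt
  rw [pvLoopFalse]
  cases hidx : PySem.List.index? tokens "paste" with
  | none => simp
  | some idx =>
    dsimp only
    rw [PySem.List.slice_to tokens (by exact Int.natCast_nonneg idx)]
    have h1 : ((idx : Int) + 1) = ((idx + 1 : Nat) : Int) := by push_cast; ring
    rw [h1, PySem.List.slice_from tokens (by exact Int.natCast_nonneg (idx + 1))]
    simp
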